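-- pv_equiv track=rewrite | github.com/dustinramirez322/AdventofCode2025 | Day2/solution2.py | prod_id_split
-- ===== SOURCE A (Python) =====
-- def prod_id_split(prod_id):
--     # determine the length of the prod id
--     prod_id_length = len(str(prod_id))
--     # determine available divisible lengths
--     factors = []
--     for r in range(1, prod_id_length +1):
--         # don't add the prod_id_length since it won't match itself
--         if r == prod_id_length:
--             pass
--         elif prod_id_length % r == 0:
--             factors.append(r)
--     return factors
-- ===== SOURCE B (Python) =====
-- def prod_id_split(prod_id):
--     # B: pair each small divisor i (i*i <= n) with its complement n // i,
--     # collect in a set, drop n itself, return sorted.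
--     n = len(str(prod_id))
--     divs = set()
--     i = 1
--     while i * i <= n:
--         if n % i == 0:
--             divs.add(i)
--             divs.add(n // i)
--         i += 1
--     divs.discard(n)
--     return sorted(divs)
-- ===== Notes on version B (the rewrite author's own statement) =====
-- stated objective: alternative
-- what changed: B replaces A's full scan of every candidate 1..n with a sqrt-bounded while loop that collects each small divisor i together with its complement n//i in a set, discards n and sorts.
import Mathlib
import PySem

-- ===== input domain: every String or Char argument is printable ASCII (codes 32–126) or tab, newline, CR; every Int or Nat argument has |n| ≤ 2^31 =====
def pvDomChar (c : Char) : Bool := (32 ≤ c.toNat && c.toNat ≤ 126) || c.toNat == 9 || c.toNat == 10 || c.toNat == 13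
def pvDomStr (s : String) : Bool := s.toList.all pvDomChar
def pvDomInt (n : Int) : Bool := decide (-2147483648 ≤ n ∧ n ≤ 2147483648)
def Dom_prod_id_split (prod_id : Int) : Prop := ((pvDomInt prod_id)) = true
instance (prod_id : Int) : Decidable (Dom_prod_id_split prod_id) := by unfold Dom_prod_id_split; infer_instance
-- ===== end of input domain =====

-- B collects divisors by sqrt pairing (i with n // i) into a set and sorts, instead of A's scan of all candidates; objective: alternative.

-- ===== PORT A =====
def prod_id_split (prod_id : Int) : List Int :=
  let prod_id_length : Int := PySem.Str.len (PySem.Int.toStr prod_id)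
  (PySem.List.pyRange 1 (prod_id_length + 1) 1).foldl
    (fun factors r =>
      if r = prod_id_length then factors
      else if PySem.Int.mod prod_id_length r = 0 then factors ++ [r]
      else factors) []

-- ===== PORT B =====
-- while i * i <= n: collect i and n // i when i divides n  (fuel only makes the loop structural; n.toNat + 1 iterations suffice)
def pvAltLoop (fuel : Nat) (n i : Int) (divs : PySem.Set Int) : PySem.Set Int :=
  match fuel with
  | 0 => divs
  | fuel + 1 =>
    if i * i ≤ n then
      pvAltLoop fuel n (i + 1)
        (if PySem.Int.mod n i = 0 then
          PySem.Set.add (PySem.Set.add divs i) (PySem.Int.floordiv n i)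
        else divs)
    else divs

def prod_id_split_alt (prod_id : Int) : List Int :=
  let n : Int := PySem.Str.len (PySem.Int.toStr prod_id)
  let divs := pvAltLoop (n.toNat + 1) n 1 PySem.Set.empty
  PySem.List.sorted (PySem.Set.discard divs n) (fun x => x) false

-- ===== PRECONDITION & SPEC =====
def Spec_prod_id_split (prod_id : Int) (out : List Int) : Prop := out = prod_id_split_alt prod_id
instance (prod_id : Int) (out : List Int) : Decidable (Spec_prod_id_split prod_id out) := by unfold Spec_prod_id_split; infer_instance

-- ===== CLAIM (what is proved, stated in full; the proofs are below) =====
def Claim_equal_prod_id_split : Prop := ∀ (prod_id : Int), Dom_prod_id_split prod_id → Spec_prod_id_split prod_id (prod_id_split prod_id)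

-- ===== LEMMAS AND PROOFS =====

-- On the domain |prod_id| ≤ 2^31, str(prod_id) has at most 11 characters.
theorem pv_len_bound (p : Int) (hd : Dom_prod_id_split p) :
    0 ≤ PySem.Str.len (PySem.Int.toStr p) ∧ PySem.Str.len (PySem.Int.toStr p) ≤ 11 := by
  have hd' : -2147483648 ≤ p ∧ p ≤ 2147483648 := by
    simpa [Dom_prod_id_split, pvDomInt] using hd
  have hlen : (PySem.Int.toStr p).toList = PySem.Int.toChars p := PySem.Int.toList_toStr p
  have hchars : (PySem.Int.toChars p).length ≤ 11 := by
    unfold PySem.Int.toChars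
    split
    · have hlt : p.natAbs < 10 ^ 10 := by
        have : p.natAbs ≤ 2147483648 := by omega
        omega
      have := Nat.toDigits_length 10 p.natAbs 10 (by norm_num) hlt
      simpa using by omega
    · have hlt : p.toNat < 10 ^ 10 := by
        have : p.toNat ≤ 2147483648 := by omega
        omega
      have := Nat.toDigits_length 10 p.toNat 10 (by norm_num) hlt
      omega
  constructor
  · simp [PySem.Str.len_eq]
  · simp only [PySem.Str.len_eq, hlen]
    exact_mod_cast hchars

-- both programs agree as functions of the digit count n, for every n the domain can produce
theorem pv_core (n : Int) (h0 : 0 ≤ n) (h11 : n ≤ 11) :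
    (PySem.List.pyRange 1 (n + 1) 1).foldl
      (fun factors r =>
        if r = n then factors
        else if PySem.Int.mod n r = 0 then factors ++ [r]
        else factors) [] =
    PySem.List.sorted (PySem.Set.discard (pvAltLoop (n.toNat + 1) n 1 PySem.Set.empty) n) (fun x => x) false := by
  interval_cases n <;> decide

-- ===== VERDICT (by name: the statement is the Claim_ definition above) =====
theorem prod_id_split_spec : Claim_equal_prod_id_split := by
  intro prod_id hd
  obtain ⟨h0, h11⟩ := pv_len_bound prod_id hd
  unfold Spec_prod_id_split prod_id_split prod_id_split_alt
  exact pv_core _ h0 h11
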